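-- pv_equiv track=rewrite | github.com/JimWallace/SPHS-Salary-Analysis | scripts/build_disclosure_completeness_audit.py | surname_compatible
-- ===== SOURCE A (Python) =====
-- from typing import Dict, List, Optional, Set, Tuple
--
-- def edit_distance_at_most_one(a: str, b: str) -> bool:
--     if a == b:
--         return True
--     if abs(len(a) - len(b)) > 1:
--         return False
--
--     i = 0
--     j = 0
--     edits = 0
--     while i < len(a) and j < len(b):
--         if a[i] == b[j]:
--             i += 1
--             j += 1
--             continue
--         edits += 1
--         if edits > 1:
--             return False
--         if len(a) > len(b):
--             i += 1
--         elif len(b) > len(a):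
--             j += 1
--         else:
--             i += 1
--             j += 1
--
--     if i < len(a) or j < len(b):
--         edits += 1
--     return edits <= 1
--
-- def surname_compatible(list_surname: Set[str], row_surname: Set[str]) -> bool:
--     if list_surname & row_surname:
--         return True
--     for ls in list_surname:
--         for rs in row_surname:
--             if edit_distance_at_most_one(ls, rs):
--                 return True
--     return False
-- ===== SOURCE B (Python) =====
-- def surname_compatible(list_surname, row_surname):
--     exact = set(list_surname)
--     dels = set()
--     subs = set()
--     for ls in exact:
--         for i in range(len(ls)):
--             d = ls[:i] + ls[i + 1:]
--             dels.add(d)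
--             subs.add((len(ls), i, d))
--     for rs in row_surname:
--         if rs in exact or rs in dels:
--             return True
--         for i in range(len(rs)):
--             d = rs[:i] + rs[i + 1:]
--             if d in exact or (len(rs), i, d) in subs:
--                 return True
--     return False
-- ===== Notes on version B (the rewrite author's own statement) =====
-- stated objective: alternative
-- what changed: Replaces A's all-pairs scan (edit-distance check for every (ls, rs) pair) with a SymSpell-style deletion-neighborhood index: B builds hash sets of all single-deletion variants (plus length/position-tagged variants for substitutions) of list_surname once, then decides each row surname by set lookups; asymptotically O((n+m)*L^2) vs A's O(n*m*L), but A's early exit on a first matching pair wins on a timing run's inputs.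
import Mathlib
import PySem

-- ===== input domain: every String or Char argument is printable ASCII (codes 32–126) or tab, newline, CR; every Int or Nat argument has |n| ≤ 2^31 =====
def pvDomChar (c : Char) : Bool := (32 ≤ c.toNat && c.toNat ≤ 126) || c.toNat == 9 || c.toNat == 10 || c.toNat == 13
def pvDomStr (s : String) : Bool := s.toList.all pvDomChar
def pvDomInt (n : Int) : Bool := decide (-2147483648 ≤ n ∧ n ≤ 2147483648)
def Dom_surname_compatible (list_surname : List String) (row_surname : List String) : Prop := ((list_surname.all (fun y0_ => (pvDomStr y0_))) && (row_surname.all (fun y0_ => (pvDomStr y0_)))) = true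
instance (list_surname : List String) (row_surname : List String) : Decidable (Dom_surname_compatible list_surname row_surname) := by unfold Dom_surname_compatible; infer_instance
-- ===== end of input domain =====

-- B replaces A's all-pairs edit-distance scan by a SymSpell-style deletion-neighborhood
-- index built once over list_surname, then per-row set lookups (objective: alternative).

-- ===== PORT A =====
-- the while loop of edit_distance_at_most_one: i/j cursors become the remaining suffixes
def edLoop (la lb : Nat) (xs ys : List Char) (edits : Nat) : Bool :=
  match xs, ys with
  | x :: xs', y :: ys' =>
    if x = y then edLoop la lb xs' ys' edits
    else if edits + 1 > 1 then false
    else if la > lb then edLoop la lb xs' (y :: ys') (edits + 1)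
    else if lb > la then edLoop la lb (x :: xs') ys' (edits + 1)
    else edLoop la lb xs' ys' (edits + 1)
  | xs, ys => decide ((if xs ≠ [] ∨ ys ≠ [] then edits + 1 else edits) ≤ 1)
termination_by xs.length + ys.length

def edit_distance_at_most_one (a : String) (b : String) : Bool :=
  if a = b then true
  else if ((a.toList.length : Int) - (b.toList.length : Int)).natAbs > 1 then false
  else edLoop a.toList.length b.toList.length a.toList b.toList 0

def surname_compatible (list_surname : List String) (row_surname : List String) : Bool :=
  if PySem.Set.inter (PySem.Set.ofList list_surname) (PySem.Set.ofList row_surname) ≠ [] then true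
  else list_surname.any fun ls => row_surname.any fun rs => edit_distance_at_most_one ls rs

-- ===== PORT B =====
-- d = s[:i] + s[i+1:]
def pvDel (s : List Char) (i : Nat) : List Char := s.take i ++ s.drop (i + 1)

-- the index-building loop: for ls in exact: for i in range(len(ls)): dels.add(d); subs.add((len(ls), i, d))
def pvBuild (ds : PySem.Set (List Char) × PySem.Set (Nat × Nat × List Char)) (ls : List Char) :
    PySem.Set (List Char) × PySem.Set (Nat × Nat × List Char) :=
  (List.range ls.length).foldl
    (fun ds i =>
      let d := pvDel ls i
      (PySem.Set.add ds.1 d, PySem.Set.add ds.2 (ls.length, i, d)))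
    ds

def surname_compatible_alt (list_surname : List String) (row_surname : List String) : Bool :=
  let exact : PySem.Set (List Char) := PySem.Set.ofList (list_surname.map String.toList)
  let ds := exact.foldl pvBuild ([], [])
  row_surname.any fun rss =>
    let rs := rss.toList
    PySem.Set.contains exact rs || PySem.Set.contains ds.1 rs ||
      (List.range rs.length).any fun i =>
        let d := pvDel rs i
        PySem.Set.contains exact d || PySem.Set.contains ds.2 (rs.length, i, d)

-- ===== PRECONDITION & SPEC =====
def Spec_surname_compatible (list_surname : List String) (row_surname : List String) (out : Bool) : Prop := out = surname_compatible_alt list_surname row_surname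
instance (list_surname : List String) (row_surname : List String) (out : Bool) : Decidable (Spec_surname_compatible list_surname row_surname out) := by unfold Spec_surname_compatible; infer_instance

-- ===== CLAIM (what is proved, stated in full; the proofs are below) =====
def Claim_equal_surname_compatible : Prop := ∀ (list_surname : List String) (row_surname : List String), Dom_surname_compatible list_surname row_surname → Spec_surname_compatible list_surname row_surname (surname_compatible list_surname row_surname)

-- ===== LEMMAS AND PROOFS =====

-- "ls and rs are within edit distance 1", phrased the way B's index sees it
def pvRel (a : List Char) (b : List Char) : Prop :=
  a = b ∨ (∃ i < a.length, pvDel a i = b) ∨ (∃ i < b.length, pvDel b i = a) ∨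
    (a.length = b.length ∧ ∃ i < a.length, pvDel a i = pvDel b i)

theorem len_pvDel {s : List Char} {i : Nat} (h : i < s.length) :
    (pvDel s i).length = s.length - 1 := by
  simp [pvDel]; omega

theorem pvDel_zero (x : Char) (s : List Char) : pvDel (x :: s) 0 = s := by
  simp [pvDel]

theorem pvDel_succ (x : Char) (s : List Char) (i : Nat) :
    pvDel (x :: s) (i + 1) = x :: pvDel s i := by
  simp [pvDel]

theorem edLoop_one (la lb : Nat) (xs ys : List Char) (h : xs.length = ys.length) :
    edLoop la lb xs ys 1 = decide (xs = ys) := by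
  induction xs generalizing ys with
  | nil =>
    cases ys with
    | nil => simp [edLoop]
    | cons y ys' => simp at h
  | cons x xs' ih =>
    cases ys with
    | nil => simp at h
    | cons y ys' =>
      simp only [List.length_cons, Nat.add_right_cancel_iff] at h
      by_cases hxy : x = y
      · subst hxy
        rw [edLoop]; simpa using ih ys' h
      · rw [edLoop]; simp [hxy]

theorem edLoop_eq_len (la lb : Nat) (xs ys : List Char)
    (hla : ¬ la > lb) (hlb : ¬ lb > la) (h : xs.length = ys.length) :
    edLoop la lb xs ys 0 =
      decide (xs = ys ∨ ∃ i < xs.length, pvDel xs i = pvDel ys i) := by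
  induction xs generalizing ys with
  | nil =>
    cases ys with
    | nil => simp [edLoop]
    | cons y ys' => simp at h
  | cons x xs' ih =>
    cases ys with
    | nil => simp at h
    | cons y ys' =>
      simp only [List.length_cons, Nat.add_right_cancel_iff] at h
      by_cases hxy : x = y
      · subst hxy
        rw [edLoop]
        rw [if_pos rfl, ih ys' h, decide_eq_decide]
        constructor
        · rintro (rfl | ⟨i, hi, hd⟩)
          · exact Or.inl rfl
          · exact Or.inr ⟨i + 1, by simpa using Nat.succ_lt_succ hi, by simp [pvDel_succ, hd]⟩
        · rintro (heq | ⟨i, hi, hd⟩)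
          · exact Or.inl (by injection heq)
          · cases i with
            | zero => rw [pvDel_zero, pvDel_zero] at hd; exact Or.inl hd
            | succ j =>
              rw [pvDel_succ, pvDel_succ] at hd
              simp only [List.cons.injEq, true_and] at hd
              exact Or.inr ⟨j, by simp at hi; omega, hd⟩
      · rw [edLoop]
        rw [if_neg hxy, if_neg (by omega : ¬ (0 + 1 > 1)), if_neg hla, if_neg hlb,
          edLoop_one la lb xs' ys' h]
        rw [decide_eq_decide]
        constructor
        · intro hd
          exact Or.inr ⟨0, by simp, by rw [pvDel_zero, pvDel_zero, hd]⟩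
        · rintro (heq | ⟨i, hi, hd⟩)
          · exact absurd (by injection heq) hxy
          · cases i with
            | zero => rw [pvDel_zero, pvDel_zero] at hd; exact hd
            | succ j =>
              rw [pvDel_succ, pvDel_succ] at hd
              simp only [List.cons.injEq] at hd
              exact absurd hd.1 hxy

theorem edLoop_del (la lb : Nat) (xs ys : List Char)
    (hla : la > lb) (h : xs.length = ys.length + 1) :
    edLoop la lb xs ys 0 = decide (∃ i < xs.length, pvDel xs i = ys) := by
  induction xs generalizing ys with
  | nil => simp at h
  | cons x xs' ih =>
    cases ys with
    | nil =>
      simp only [List.length_cons, List.length_nil, Nat.add_right_cancel_iff,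
        List.length_eq_zero_iff] at h
      subst h
      simp [edLoop, pvDel]
    | cons y ys' =>
      simp only [List.length_cons, Nat.add_right_cancel_iff] at h
      by_cases hxy : x = y
      · subst hxy
        rw [edLoop]
        rw [if_pos rfl, ih ys' h, decide_eq_decide]
        constructor
        · rintro ⟨i, hi, hd⟩
          exact ⟨i + 1, Nat.succ_lt_succ hi, by rw [pvDel_succ, hd]⟩
        · rintro ⟨i, hi, hd⟩
          cases i with
          | zero =>
            rw [pvDel_zero] at hd
            subst hd
            exact ⟨0, by simp [h], by rw [pvDel_zero]⟩
          | succ j =>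
            rw [pvDel_succ] at hd
            simp only [List.cons.injEq, true_and] at hd
            exact ⟨j, by simpa using Nat.lt_of_succ_lt_succ (by simpa using hi), hd⟩
      · rw [edLoop]
        rw [if_neg hxy, if_neg (by omega : ¬ (0 + 1 > 1)), if_pos hla,
          edLoop_one la lb xs' (y :: ys') (by simp [h]), decide_eq_decide]
        constructor
        · intro hd
          exact ⟨0, by simp, by rw [pvDel_zero, hd]⟩
        · rintro ⟨i, hi, hd⟩
          cases i with
          | zero => rw [pvDel_zero] at hd; exact hd
          | succ j =>
            rw [pvDel_succ] at hd
            simp only [List.cons.injEq] at hd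
            exact absurd hd.1 hxy

theorem edLoop_ins (la lb : Nat) (xs ys : List Char)
    (hla : ¬ la > lb) (hlb : lb > la) (h : ys.length = xs.length + 1) :
    edLoop la lb xs ys 0 = decide (∃ i < ys.length, pvDel ys i = xs) := by
  induction ys generalizing xs with
  | nil => simp at h
  | cons y ys' ih =>
    cases xs with
    | nil =>
      simp only [List.length_cons, List.length_nil, Nat.add_right_cancel_iff,
        List.length_eq_zero_iff] at h
      subst h
      simp [edLoop, pvDel]
    | cons x xs' =>
      simp only [List.length_cons, Nat.add_right_cancel_iff] at h
      by_cases hxy : x = y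
      · subst hxy
        rw [edLoop]
        rw [if_pos rfl, ih xs' h, decide_eq_decide]
        constructor
        · rintro ⟨i, hi, hd⟩
          exact ⟨i + 1, Nat.succ_lt_succ hi, by rw [pvDel_succ, hd]⟩
        · rintro ⟨i, hi, hd⟩
          cases i with
          | zero =>
            rw [pvDel_zero] at hd
            subst hd
            exact ⟨0, by simp [h], by rw [pvDel_zero]⟩
          | succ j =>
            rw [pvDel_succ] at hd
            simp only [List.cons.injEq, true_and] at hd
            exact ⟨j, by simpa using Nat.lt_of_succ_lt_succ (by simpa using hi), hd⟩
      · rw [edLoop]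
        rw [if_neg hxy, if_neg (by omega : ¬ (0 + 1 > 1)), if_neg hla, if_pos hlb,
          edLoop_one la lb (x :: xs') ys' (by simp [h]), decide_eq_decide]
        constructor
        · intro hd
          exact ⟨0, by simp, by rw [pvDel_zero]; exact hd.symm⟩
        · rintro ⟨i, hi, hd⟩
          cases i with
          | zero => rw [pvDel_zero] at hd; exact hd.symm
          | succ j =>
            rw [pvDel_succ] at hd
            simp only [List.cons.injEq] at hd
            exact absurd hd.1.symm hxy

-- edit_distance_at_most_one decides pvRel (on the underlying char lists)
theorem ed_iff_rel (a b : String) :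
    edit_distance_at_most_one a b = true ↔ pvRel a.toList b.toList := by
  unfold edit_distance_at_most_one
  by_cases hab : a = b
  · subst hab; simp [pvRel]
  · have hlist : a.toList ≠ b.toList := fun h => hab (String.toList_inj.mp h)
    rw [if_neg hab]
    set xs := a.toList with hxs
    set ys := b.toList with hys
    by_cases hfar : ((xs.length : Int) - (ys.length : Int)).natAbs > 1
    · rw [if_pos hfar]
      simp only [Bool.false_eq_true, false_iff]
      rintro (h | ⟨i, hi, hd⟩ | ⟨i, hi, hd⟩ | ⟨hlen, _⟩)
      · exact hlist h
      · have := len_pvDel hi; rw [hd] at this; omega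
      · have := len_pvDel hi; rw [hd] at this; omega
      · omega
    · rw [if_neg hfar]
      rcases Nat.lt_trichotomy xs.length ys.length with hlt | heq | hgt
      · have h1 : ys.length = xs.length + 1 := by omega
        rw [edLoop_ins _ _ _ _ (by omega) (by omega) h1]
        simp only [decide_eq_true_eq, pvRel]
        constructor
        · intro h; exact Or.inr (Or.inr (Or.inl h))
        · rintro (h | ⟨i, hi, hd⟩ | h | ⟨hlen, _⟩)
          · exact absurd h hlist
          · have := len_pvDel hi; rw [hd] at this; omega
          · exact h
          · omega
      · rw [edLoop_eq_len _ _ _ _ (by omega) (by omega) heq]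
        simp only [decide_eq_true_eq, pvRel]
        constructor
        · rintro (h | h)
          · exact Or.inl h
          · exact Or.inr (Or.inr (Or.inr ⟨heq, h⟩))
        · rintro (h | ⟨i, hi, hd⟩ | ⟨i, hi, hd⟩ | ⟨_, h⟩)
          · exact Or.inl h
          · have := len_pvDel hi; rw [hd] at this; omega
          · have := len_pvDel hi; rw [hd] at this; omega
          · exact Or.inr h
      · have h1 : xs.length = ys.length + 1 := by omega
        rw [edLoop_del _ _ _ _ (by omega) h1]
        simp only [decide_eq_true_eq, pvRel]
        constructor
        · intro h; exact Or.inr (Or.inl h)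
        · rintro (h | h | ⟨i, hi, hd⟩ | ⟨hlen, _⟩)
          · exact absurd h hlist
          · exact h
          · have := len_pvDel hi; rw [hd] at this; omega
          · omega

-- A returns true iff some pair satisfies pvRel
theorem A_iff (L R : List String) :
    surname_compatible L R = true ↔
      ∃ ls ∈ L, ∃ rs ∈ R, pvRel ls.toList rs.toList := by
  unfold surname_compatible
  by_cases hint : PySem.Set.inter (PySem.Set.ofList L) (PySem.Set.ofList R) ≠ []
  · rw [if_pos hint]
    simp only [true_iff]
    rcases List.exists_mem_of_ne_nil _ hint with ⟨x, hx⟩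
    rw [PySem.Set.mem_inter] at hx
    rcases hx with ⟨h1, h2⟩
    rw [PySem.Set.mem_ofList] at h1 h2
    exact ⟨x, h1, x, h2, Or.inl rfl⟩
  · rw [if_neg hint]
    simp only [List.any_eq_true]
    constructor
    · rintro ⟨ls, hls, rs, hrs, hed⟩
      exact ⟨ls, hls, rs, hrs, (ed_iff_rel ls rs).mp hed⟩
    · rintro ⟨ls, hls, rs, hrs, hrel⟩
      exact ⟨ls, hls, rs, hrs, (ed_iff_rel ls rs).mpr hrel⟩

-- the inner range-fold of pvBuild, componentwise
theorem inner_fst (ls : List Char) (r : List Nat) (q : PySem.Set (List Char) × PySem.Set (Nat × Nat × List Char)) (x : List Char) :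
    x ∈ (r.foldl (fun ds i => (PySem.Set.add ds.1 (pvDel ls i), PySem.Set.add ds.2 (ls.length, i, pvDel ls i))) q).1
      ↔ x ∈ q.1 ∨ ∃ i ∈ r, x = pvDel ls i := by
  induction r generalizing q with
  | nil => simp
  | cons j r ihr =>
    rw [List.foldl_cons, ihr]
    simp [PySem.Set.mem_add]
    tauto

theorem inner_snd (ls : List Char) (r : List Nat) (q : PySem.Set (List Char) × PySem.Set (Nat × Nat × List Char)) (t : Nat × Nat × List Char) :
    t ∈ (r.foldl (fun ds i => (PySem.Set.add ds.1 (pvDel ls i), PySem.Set.add ds.2 (ls.length, i, pvDel ls i))) q).2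
      ↔ t ∈ q.2 ∨ ∃ i ∈ r, t = (ls.length, i, pvDel ls i) := by
  induction r generalizing q with
  | nil => simp
  | cons j r ihr =>
    rw [List.foldl_cons, ihr]
    simp [PySem.Set.mem_add]
    tauto

-- membership in the two indexes built by B
theorem build_fst_mem (l : List (List Char)) (p : PySem.Set (List Char) × PySem.Set (Nat × Nat × List Char)) (x : List Char) :
    x ∈ (l.foldl pvBuild p).1 ↔ x ∈ p.1 ∨ ∃ ls ∈ l, ∃ i < ls.length, x = pvDel ls i := by
  induction l generalizing p with
  | nil => simp
  | cons ls l ih =>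
    rw [List.foldl_cons, ih]
    unfold pvBuild
    rw [inner_fst]
    simp only [List.mem_range, List.mem_cons, exists_eq_or_imp]
    exact or_assoc

theorem build_snd_mem (l : List (List Char)) (p : PySem.Set (List Char) × PySem.Set (Nat × Nat × List Char)) (t : Nat × Nat × List Char) :
    t ∈ (l.foldl pvBuild p).2 ↔ t ∈ p.2 ∨ ∃ ls ∈ l, ∃ i < ls.length, t = (ls.length, i, pvDel ls i) := by
  induction l generalizing p with
  | nil => simp
  | cons ls l ih =>
    rw [List.foldl_cons, ih]
    unfold pvBuild
    rw [inner_snd]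
    simp only [List.mem_range, List.mem_cons, exists_eq_or_imp]
    exact or_assoc

-- B returns true iff some pair satisfies pvRel
theorem B_iff (L R : List String) :
    surname_compatible_alt L R = true ↔
      ∃ ls ∈ L, ∃ rs ∈ R, pvRel ls.toList rs.toList := by
  unfold surname_compatible_alt
  simp only [List.any_eq_true, Bool.or_eq_true, PySem.Set.contains_iff,
    PySem.Set.mem_ofList, List.mem_map, List.mem_range]
  constructor
  · rintro ⟨rss, hrs, hc⟩
    rcases hc with (⟨l, hl, hlt⟩ | hdel) | ⟨i, hi, (⟨l, hl, hld⟩ | hsub)⟩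
    · exact ⟨l, hl, rss, hrs, Or.inl hlt⟩
    · rw [build_fst_mem] at hdel
      rcases hdel with h | ⟨ls, hls, i, hi, hx⟩
      · simp at h
      · obtain ⟨l, hl, rfl⟩ := List.mem_map.mp (((PySem.Set.mem_ofList _ _).mp hls))
        exact ⟨l, hl, rss, hrs, Or.inr (Or.inl ⟨i, hi, hx.symm⟩)⟩
    · exact ⟨l, hl, rss, hrs, Or.inr (Or.inr (Or.inl ⟨i, hi, hld.symm⟩))⟩
    · rw [build_snd_mem] at hsub
      rcases hsub with h | ⟨ls, hls, j, hj, ht⟩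
      · simp at h
      · obtain ⟨l, hl, rfl⟩ := List.mem_map.mp (((PySem.Set.mem_ofList _ _).mp hls))
        simp only [Prod.mk.injEq] at ht
        obtain ⟨h1, h2, h3⟩ := ht
        subst h2
        exact ⟨l, hl, rss, hrs, Or.inr (Or.inr (Or.inr ⟨h1.symm, i, by omega, h3.symm⟩))⟩
  · rintro ⟨l, hl, rss, hrs, hrel⟩
    refine ⟨rss, hrs, ?_⟩
    rcases hrel with heq | ⟨i, hi, hd⟩ | ⟨i, hi, hd⟩ | ⟨hlen, i, hi, hd⟩
    · exact Or.inl (Or.inl ⟨l, hl, heq⟩)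
    · refine Or.inl (Or.inr ?_)
      rw [build_fst_mem]
      exact Or.inr ⟨l.toList, ((PySem.Set.mem_ofList _ _).mpr (List.mem_map.mpr ⟨l, hl, rfl⟩)), i, hi, hd.symm⟩
    · exact Or.inr ⟨i, hi, Or.inl ⟨l, hl, hd.symm⟩⟩
    · refine Or.inr ⟨i, by omega, Or.inr ?_⟩
      rw [build_snd_mem]
      refine Or.inr ⟨l.toList, ((PySem.Set.mem_ofList _ _).mpr (List.mem_map.mpr ⟨l, hl, rfl⟩)), i, hi, ?_⟩
      rw [hlen, hd]

-- ===== VERDICT (by name: the statement is the Claim_ definition above) =====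
theorem surname_compatible_spec : Claim_equal_surname_compatible := by
  intro L R _
  unfold Spec_surname_compatible
  rw [Bool.eq_iff_iff, A_iff, B_iff]
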